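-- pv_equiv track=rewrite | github.com/vinadsa/ASA | Hackerrank 3/jajan_manis.py | partisi
-- ===== SOURCE A (Python) =====
-- def jml_unik(sub_arr): # hitung jml elemen unik
--     return len(set(sub_arr))
--
-- def partisi(i, segment, arr):
--     n = len(arr)
--     if segment == 0: # basis, segment habis
--         if i == n:
--             return 0
--         else:
--             return -10000
--
--     best = -10000
--     for j in range(i + 1, n - segment + 3):
--         cost = jml_unik(arr[i:j])
--         best = max(best, cost + partisi(j, segment - 1, arr))
--
--     return best
-- ===== SOURCE B (Python) =====
-- def partisi(i, segment, arr):
--     n = len(arr)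
--     if segment == 0:
--         return 0 if i == n else -10000
--     if i + 1 >= n - segment + 3:
--         # no split point available at all
--         return -10000
--     # bottom-up DP: f[p - i] = best value starting at position p with s segments left
--     f = [0 if p == n else -10000 for p in range(i, n + 3)]
--     for s in range(1, segment):
--         f = [max([-10000] + [len(set(arr[p:j])) + f[j - i] for j in range(p + 1, n - s + 3)])
--              for p in range(i, n + 3)]
--     # last stage: only the row for the start position itself is needed
--     return max([-10000] + [len(set(arr[i:j])) + f[j - i] for j in range(i + 1, n - segment + 3)])
-- ===== Notes on version B (the rewrite author's own statement) =====
-- stated objective: alternative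
-- what changed: A's exponential top-down recursion over all partition points is replaced by a bottom-up dynamic-programming table f[p-i] (best value from position p with s segments left), filled stage by stage, so each subproblem is computed once.
import Mathlib
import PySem

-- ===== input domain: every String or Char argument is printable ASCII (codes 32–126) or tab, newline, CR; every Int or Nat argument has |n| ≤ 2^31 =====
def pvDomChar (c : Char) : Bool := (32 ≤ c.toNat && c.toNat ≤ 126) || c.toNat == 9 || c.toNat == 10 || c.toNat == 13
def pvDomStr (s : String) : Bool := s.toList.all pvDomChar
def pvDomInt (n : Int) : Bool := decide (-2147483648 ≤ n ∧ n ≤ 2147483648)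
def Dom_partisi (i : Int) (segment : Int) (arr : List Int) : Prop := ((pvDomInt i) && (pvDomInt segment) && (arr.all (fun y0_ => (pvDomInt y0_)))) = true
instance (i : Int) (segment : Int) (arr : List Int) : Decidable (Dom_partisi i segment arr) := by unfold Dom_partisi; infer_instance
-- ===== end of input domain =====

-- B replaces A's top-down recursion by a bottom-up DP table over (position, segments left), computing each subproblem once.

-- ===== PORT A =====
def jml_unik (sub_arr : List Int) : Int :=
  ((PySem.Set.ofList sub_arr).length : Int)

-- A's recursion, with the (nonnegative) segment as structural fuel; for segment < 0 with a
-- nonempty loop range the Python recurses without a base case (RecursionError), which Pre_ excludes.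
def partisiFuel (arr : List Int) : Nat → Int → Int
  | 0, i => if i = (arr.length : Int) then 0 else -10000
  | s+1, i =>
    (PySem.List.pyRange (i + 1) ((arr.length : Int) - ((s : Int) + 1) + 3) 1).foldl
      (fun best j =>
        max best (jml_unik (PySem.List.slice arr (some i) (some j)) + partisiFuel arr s j))
      (-10000)

def partisi (i : Int) (segment : Int) (arr : List Int) : Int :=
  partisiFuel arr segment.toNat i

-- ===== PORT B =====
-- one DP stage: from the table for s-1 segments left, build the table for s segments left
-- (entry at offset p - i is the best value starting at position p)
def bRow (arr : List Int) (i : Int) (f : List Int) (s : Int) : List Int :=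
  (PySem.List.pyRange i ((arr.length : Int) + 3) 1).map (fun p =>
    ((PySem.List.pyRange (p + 1) ((arr.length : Int) - s + 3) 1).map
        (fun j => ((PySem.Set.ofList (PySem.List.slice arr (some p) (some j))).length : Int)
                  + PySem.List.pyGetD f (j - i) (-10000))).foldl max (-10000))

def partisi_alt (i : Int) (segment : Int) (arr : List Int) : Int :=
  let n : Int := arr.length
  if segment = 0 then (if i = n then 0 else -10000)
  else if i + 1 ≥ n - segment + 3 then -10000
  else
    let f0 : List Int := (PySem.List.pyRange i (n + 3) 1).map (fun p => if p = n then 0 else -10000)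
    let f : List Int := (PySem.List.pyRange 1 segment 1).foldl (fun f s => bRow arr i f s) f0
    ((PySem.List.pyRange (i + 1) (n - segment + 3) 1).map
        (fun j => ((PySem.Set.ofList (PySem.List.slice arr (some i) (some j))).length : Int)
                  + PySem.List.pyGetD f (j - i) (-10000))).foldl max (-10000)

-- ===== PRECONDITION & SPEC =====
-- Pre_ is exactly the set of inputs on which A terminates: it excludes only segment < 0 with a
-- nonempty loop range (i < len(arr) - segment + 2), where A recurses forever (RecursionError).
def Pre_partisi (i : Int) (segment : Int) (arr : List Int) : Prop :=
  0 ≤ segment ∨ (arr.length : Int) - segment + 2 ≤ i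
instance (i : Int) (segment : Int) (arr : List Int) : Decidable (Pre_partisi i segment arr) := by
  unfold Pre_partisi; infer_instance

def pvWitness_partisi : Int × Int × List Int := (0, 2, [1, 2, 1])

def Spec_partisi (i : Int) (segment : Int) (arr : List Int) (out : Int) : Prop := out = partisi_alt i segment arr
instance (i : Int) (segment : Int) (arr : List Int) (out : Int) : Decidable (Spec_partisi i segment arr out) := by unfold Spec_partisi; infer_instance

-- ===== CLAIM (what is proved, stated in full; the proofs are below) =====
def Claim_equal_partisi : Prop := ∀ (i : Int) (segment : Int) (arr : List Int), Dom_partisi i segment arr → Pre_partisi i segment arr → Spec_partisi i segment arr (partisi i segment arr)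

-- ===== LEMMAS AND PROOFS =====

-- the exact DP table after stage s: entry at offset p - i is A's value from position p with s segments left
def table (arr : List Int) (i : Int) (s : Nat) : List Int :=
  (PySem.List.pyRange i ((arr.length : Int) + 3) 1).map (fun p => partisiFuel arr s p)

theorem pyGetD_table (arr : List Int) (i : Int) (s : Nat) (j : Int) (h0 : i ≤ j)
    (h1 : j < (arr.length : Int) + 3) :
    PySem.List.pyGetD (table arr i s) (j - i) (-10000) = partisiFuel arr s j := by
  unfold table
  have hk : j - i = (((j - i).toNat : Nat) : Int) := (Int.toNat_of_nonneg (by omega)).symm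
  rw [hk, PySem.List.pyGetD_map_pyRange_one _ _ _ _ _ (by omega)]
  congr 1
  omega

theorem cell_eq (arr : List Int) (i : Int) (s : Nat) (f : List Int)
    (hf : ∀ j : Int, i ≤ j → j < (arr.length : Int) + 3 →
      PySem.List.pyGetD f (j - i) (-10000) = partisiFuel arr s j)
    (p : Int) (hp : i ≤ p) :
    ((PySem.List.pyRange (p + 1) ((arr.length : Int) - ((s : Int) + 1) + 3) 1).map
        (fun j => ((PySem.Set.ofList (PySem.List.slice arr (some p) (some j))).length : Int)
                  + PySem.List.pyGetD f (j - i) (-10000))).foldl max (-10000) =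
      partisiFuel arr (s + 1) p := by
  rw [List.foldl_map]
  simp only [partisiFuel, jml_unik]
  apply PySem.List.foldl_congr_mem
  intro best j hj
  rw [PySem.List.mem_pyRange_one] at hj
  rw [hf j (by omega) (by omega)]

theorem bRow_eq (arr : List Int) (i : Int) (s : Nat) (f : List Int)
    (hf : ∀ j : Int, i ≤ j → j < (arr.length : Int) + 3 →
      PySem.List.pyGetD f (j - i) (-10000) = partisiFuel arr s j) :
    bRow arr i f ((s : Int) + 1) = table arr i (s + 1) := by
  unfold bRow table
  apply List.map_congr_left
  intro p hp
  rw [PySem.List.mem_pyRange_one] at hp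
  exact cell_eq arr i s f hf p (by omega)

theorem bRow_table (arr : List Int) (i : Int) (s : Nat) :
    bRow arr i (table arr i s) ((s : Int) + 1) = table arr i (s + 1) :=
  bRow_eq arr i s _ (fun j h0 h1 => pyGetD_table arr i s j h0 h1)

theorem stage_fold (arr : List Int) (i : Int) (t : Nat) :
    (PySem.List.pyRange 1 ((t : Int) + 1) 1).foldl (fun f s => bRow arr i f s)
      (table arr i 0) = table arr i t := by
  induction t with
  | zero =>
    rw [show ((0 : Nat) : Int) + 1 = 1 by simp]
    rw [PySem.List.pyRange_one_eq_nil le_rfl]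
    rfl
  | succ k ih =>
    have hsplit : PySem.List.pyRange 1 (((k : Int) + 1) + 1) 1 =
        PySem.List.pyRange 1 ((k : Int) + 1) 1 ++ [(k : Int) + 1] := by
      exact PySem.List.pyRange_one_succ_right (by omega)
    have : ((k + 1 : Nat) : Int) + 1 = (((k : Int) + 1) + 1) := by push_cast; ring
    rw [this, hsplit, List.foldl_append, ih]
    simpa using bRow_table arr i k

theorem f0_eq_table0 (arr : List Int) (i : Int) :
    (PySem.List.pyRange i ((arr.length : Int) + 3) 1).map
      (fun p => if p = (arr.length : Int) then 0 else -10000) = table arr i 0 := by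
  unfold table
  apply List.map_congr_left
  intro p _
  simp [partisiFuel]

-- when the top-level range is empty, A returns -10000 at once
theorem fuel_empty (arr : List Int) (s : Nat) (i : Int)
    (h : (arr.length : Int) - ((s : Int) + 1) + 3 ≤ i + 1) :
    partisiFuel arr (s + 1) i = -10000 := by
  simp [partisiFuel, PySem.List.pyRange_one_eq_nil (by omega : (arr.length : Int) - ((s : Int) + 1) + 3 ≤ i + 1)]

-- ===== VERDICT (by name: the statement is the Claim_ definition above) =====
theorem partisi_spec : Claim_equal_partisi := by
  intro i segment arr _ hpre
  show partisi i segment arr = partisi_alt i segment arr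
  unfold partisi partisi_alt
  by_cases h0 : segment = 0
  · subst h0; simp [partisiFuel]
  · simp only [if_neg h0]
    by_cases hempty : i + 1 ≥ (arr.length : Int) - segment + 3
    · simp only [if_pos hempty]
      by_cases hneg : segment < 0
      · -- Pre_ forces the empty-range case: A's port takes the fuel-0 base with i ≠ len(arr)
        have : segment.toNat = 0 := by omega
        rw [this]
        have : ¬ (i = (arr.length : Int)) := by
          rcases hpre with h | h
          · omega
          · omega
        simp [partisiFuel, this]
      · obtain ⟨t, ht⟩ : ∃ t : Nat, segment.toNat = t + 1 := ⟨segment.toNat - 1, by omega⟩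
        have htc : (t : Int) + 1 = segment := by omega
        rw [ht]
        exact fuel_empty arr t i (by omega)
    · simp only [if_neg hempty]
      rw [f0_eq_table0 arr i]
      have hs1 : 1 ≤ segment := by
        rcases hpre with h | h
        · omega
        · omega
      obtain ⟨t, ht⟩ : ∃ t : Nat, segment.toNat = t + 1 := ⟨segment.toNat - 1, by omega⟩
      have hts : segment = (t : Int) + 1 := by omega
      rw [ht, hts, stage_fold arr i t]
      exact (cell_eq arr i t (table arr i t)
        (fun j h0 h1 => pyGetD_table arr i t j h0 h1) i le_rfl).symm
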